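-- pv_equiv track=rewrite | github.com/mramalingam2203/geeks-for-geeks-go | workbench/arrays.py | subarrayOfGivenProduct
-- ===== SOURCE A (Python) =====
-- from functools import reduce
-- from operator import mul
--
-- def subarrayOfGivenProduct(a, PROD):
-- 	n = len(a)
-- 	subarrays = []
-- 	for i in range(n):
-- 		for j in range(i, n):
-- 			subarray = []
-- 			for k in range(i, j+1):
-- 				subarray.append(a[k])
--
-- 			if reduce(mul, subarray) == PROD:
-- 				return True
-- 	return False
-- ===== SOURCE B (Python) =====
-- def subarrayOfGivenProduct(a, PROD):
--     n = len(a)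
--     for i in range(n):
--         p = 1
--         for j in range(i, n):
--             p *= a[j]
--             if p == PROD:
--                 return True
--     return False
-- ===== Notes on version B (the rewrite author's own statement) =====
-- stated objective: faster
-- what changed: B keeps a running product per start index instead of rebuilding each subarray and re-reducing it, removing A's inner materialisation loop.
import Mathlib
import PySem

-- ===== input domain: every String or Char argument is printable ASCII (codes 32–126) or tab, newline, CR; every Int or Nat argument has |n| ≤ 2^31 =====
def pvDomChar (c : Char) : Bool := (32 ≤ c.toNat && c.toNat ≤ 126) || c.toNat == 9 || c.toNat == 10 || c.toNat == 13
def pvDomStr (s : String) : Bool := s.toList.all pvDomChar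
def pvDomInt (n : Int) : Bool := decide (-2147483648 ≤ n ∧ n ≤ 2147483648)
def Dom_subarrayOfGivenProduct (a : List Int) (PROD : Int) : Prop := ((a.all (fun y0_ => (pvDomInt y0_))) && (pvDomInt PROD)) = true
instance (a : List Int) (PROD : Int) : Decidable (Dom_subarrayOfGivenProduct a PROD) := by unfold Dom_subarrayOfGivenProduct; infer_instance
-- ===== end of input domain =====

-- B replaces A's rebuild-and-reduce of every subarray by a running product per start index (O(n^2) vs O(n^3)).

-- ===== PORT A =====
-- reduce(mul, l): Python raises TypeError on []; that branch is unreachable here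
-- (the k-loop range i..j with i ≤ j is never empty), value 0 is arbitrary.
def pyReduceMul (l : List Int) : Int :=
  match l with
  | [] => 0
  | x :: xs => xs.foldl (· * ·) x

def subarrayOfGivenProduct (a : List Int) (PROD : Int) : Bool :=
  let n : Int := a.length
  (PySem.List.pyRange 0 n 1).any fun i =>
    (PySem.List.pyRange i n 1).any fun j =>
      let subarray := (PySem.List.pyRange i (j + 1) 1).foldl
        (fun acc k => acc ++ [PySem.List.pyGetD a k 0]) []
      pyReduceMul subarray == PROD

-- ===== PORT B =====
def subarrayOfGivenProduct_alt (a : List Int) (PROD : Int) : Bool :=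
  let n : Int := a.length
  (PySem.List.pyRange 0 n 1).any fun i =>
    ((PySem.List.pyRange i n 1).foldl
      (fun (st : Bool × Int) j =>
        if st.1 then st
        else
          let p := st.2 * PySem.List.pyGetD a j 0
          (p == PROD, p))
      (false, 1)).1

-- ===== PRECONDITION & SPEC =====
def Spec_subarrayOfGivenProduct (a : List Int) (PROD : Int) (out : Bool) : Prop := out = subarrayOfGivenProduct_alt a PROD
instance (a : List Int) (PROD : Int) (out : Bool) : Decidable (Spec_subarrayOfGivenProduct a PROD out) := by unfold Spec_subarrayOfGivenProduct; infer_instance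

-- ===== CLAIM (what is proved, stated in full; the proofs are below) =====
def Claim_equal_subarrayOfGivenProduct : Prop := ∀ (a : List Int) (PROD : Int), Dom_subarrayOfGivenProduct a PROD → Spec_subarrayOfGivenProduct a PROD (subarrayOfGivenProduct a PROD)

-- ===== LEMMAS AND PROOFS =====

-- the step function of B's inner fold
def stepB (a : List Int) (PROD : Int) (st : Bool × Int) (j : Int) : Bool × Int :=
  if st.1 then st
  else
    let p := st.2 * PySem.List.pyGetD a j 0
    (p == PROD, p)

-- B's inner fold without the early-exit flag
def auxB (a : List Int) (PROD : Int) : List Int → Int → Bool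
  | [], _ => false
  | j :: js, p => (p * PySem.List.pyGetD a j 0 == PROD) || auxB a PROD js (p * PySem.List.pyGetD a j 0)

theorem foldB_true (a : List Int) (PROD : Int) (js : List Int) (p : Int) :
    js.foldl (stepB a PROD) (true, p) = (true, p) := by
  induction js with
  | nil => rfl
  | cons j js ih => simpa [stepB] using ih

theorem foldB_false (a : List Int) (PROD : Int) (js : List Int) (p : Int) :
    (js.foldl (stepB a PROD) (false, p)).1 = auxB a PROD js p := by
  induction js generalizing p with
  | nil => rfl
  | cons j js ih =>
    by_cases h : (p * PySem.List.pyGetD a j 0 == PROD) = true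
    · simp [stepB, auxB, h, foldB_true]
    · simp only [Bool.not_eq_true] at h
      simp [stepB, auxB, h, ih]

-- A's subarray-building foldl is a map
theorem foldA_eq_map (a : List Int) (ks : List Int) (acc : List Int) :
    ks.foldl (fun acc k => acc ++ [PySem.List.pyGetD a k 0]) acc
      = acc ++ ks.map (fun k => PySem.List.pyGetD a k 0) := by
  induction ks generalizing acc with
  | nil => simp
  | cons k ks ih => simp [ih]

theorem foldl_mul_eq (xs : List Int) : ∀ (x : Int), xs.foldl (· * ·) x = x * xs.prod := by
  induction xs with
  | nil => intro x; simp
  | cons y ys ih => intro x; simp only [List.foldl_cons, List.prod_cons, ih, mul_assoc]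

theorem reduceMul_eq_prod (l : List Int) (h : l ≠ []) : pyReduceMul l = l.prod := by
  match l with
  | x :: xs =>
    show xs.foldl (· * ·) x = (x :: xs).prod
    rw [List.prod_cons, foldl_mul_eq]

-- product of a[i..m-1]
def segProd (a : List Int) (i m : Int) : Int :=
  ((PySem.List.pyRange i m 1).map (fun k => PySem.List.pyGetD a k 0)).prod

theorem segProd_succ (a : List Int) (i m : Int) (h : i ≤ m) :
    segProd a i (m + 1) = segProd a i m * PySem.List.pyGetD a m 0 := by
  unfold segProd
  rw [PySem.List.pyRange_one_succ_right h]
  simp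

-- key: B's flagless fold over the j-range, started at A's partial product, tests
-- exactly A's per-j predicate
theorem aux_eq_any (a : List Int) (PROD : Int) (i : Int) :
    ∀ (fuel : Nat) (m : Int), i ≤ m → fuel = ((a.length : Int) - m).toNat →
    auxB a PROD (PySem.List.pyRange m (a.length : Int) 1) (segProd a i m)
      = (PySem.List.pyRange m (a.length : Int) 1).any fun j =>
          pyReduceMul ((PySem.List.pyRange i (j + 1) 1).map (fun k => PySem.List.pyGetD a k 0)) == PROD := by
  intro fuel
  induction fuel with
  | zero =>
    intro m him hfuel
    have hmn : (a.length : Int) ≤ m := by omega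
    rw [PySem.List.pyRange_one_eq_nil hmn]
    rfl
  | succ f ih =>
    intro m him hfuel
    by_cases hmn : m < (a.length : Int)
    · rw [PySem.List.pyRange_one_cons hmn]
      have hne : (PySem.List.pyRange i (m + 1) 1).map (fun k => PySem.List.pyGetD a k 0) ≠ [] := by
        have : m ∈ PySem.List.pyRange i (m + 1) 1 := by
          rw [PySem.List.mem_pyRange_one]; omega
        intro hnil
        simp only [List.map_eq_nil_iff] at hnil
        rw [hnil] at this; exact List.not_mem_nil this
      have hred : pyReduceMul ((PySem.List.pyRange i (m + 1) 1).map (fun k => PySem.List.pyGetD a k 0))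
          = segProd a i m * PySem.List.pyGetD a m 0 := by
        rw [reduceMul_eq_prod _ hne, ← segProd_succ a i m him]; rfl
      simp only [auxB, List.any_cons]
      rw [hred, ← segProd_succ a i m him, ih (m + 1) (by omega) (by omega)]
    · have h' : (a.length : Int) ≤ m := by omega
      rw [PySem.List.pyRange_one_eq_nil h']
      rfl

theorem segProd_self (a : List Int) (i : Int) : segProd a i i = 1 := by
  unfold segProd
  rw [PySem.List.pyRange_one_eq_nil le_rfl]
  rfl

-- ===== VERDICT (by name: the statement is the Claim_ definition above) =====
theorem subarrayOfGivenProduct_spec : Claim_equal_subarrayOfGivenProduct := by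
  intro a PROD _
  show subarrayOfGivenProduct a PROD = subarrayOfGivenProduct_alt a PROD
  unfold subarrayOfGivenProduct subarrayOfGivenProduct_alt
  refine List.any_congr rfl (fun i => ?_)
  have hB : ((PySem.List.pyRange i (a.length : Int) 1).foldl (stepB a PROD) (false, 1)).1
      = auxB a PROD (PySem.List.pyRange i (a.length : Int) 1) (segProd a i i) := by
    rw [segProd_self, foldB_false]
  have hA := aux_eq_any a PROD i (((a.length : Int) - i).toNat) i le_rfl rfl
  rw [segProd_self] at hA
  calc ((PySem.List.pyRange i (a.length : Int) 1).any fun j =>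
          pyReduceMul ((PySem.List.pyRange i (j + 1) 1).foldl
            (fun acc k => acc ++ [PySem.List.pyGetD a k 0]) []) == PROD)
      = (PySem.List.pyRange i (a.length : Int) 1).any (fun j =>
          pyReduceMul ((PySem.List.pyRange i (j + 1) 1).map (fun k => PySem.List.pyGetD a k 0)) == PROD) := by
        refine List.any_congr rfl (fun j => ?_)
        rw [foldA_eq_map]; simp
    _ = auxB a PROD (PySem.List.pyRange i (a.length : Int) 1) 1 := (by rw [hA])
    _ = ((PySem.List.pyRange i (a.length : Int) 1).foldl (stepB a PROD) (false, 1)).1 := by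
        rw [hB, segProd_self]
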